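-- pv_equiv track=rewrite | github.com/kains675/UPDD | tests/test_stage2_partitioning.py | _count_peptide_bond_links
-- ===== SOURCE A (Python) =====
-- def _count_peptide_bond_links(contact_set):
--     """Count link H atoms produced by peptide-bond breaks at target QM
--     boundaries under whole-residue QM. For each contiguous run of contact
--     residues there are 2 breaks (N-side + C-side). Multi-residue blocks
--     reduce to 2 breaks total, so this reflects the ``_add_link_atoms``
--     output for the target chain under whole mode. Binder is fully QM
--     (cyclic) so it contributes 0 link atoms.
--     """
--     n_links = 0
--     sorted_rns = sorted(contact_set)
--     in_run = False
--     for rn in sorted_rns: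
--         if rn - 1 not in contact_set:
--             n_links += 1  # N-side boundary (prev residue in MM)
--         if rn + 1 not in contact_set:
--             n_links += 1  # C-side boundary (next residue in MM)
--     return n_links
-- ===== SOURCE B (Python) =====
-- def _count_peptide_bond_links(contact_set):
--     """Every maximal run of consecutive contact residues contributes exactly
--     two peptide-bond breaks (one N-side, one C-side), so count the run heads
--     (residues whose predecessor is not a contact) and double."""
--     s = set(contact_set)
--     runs = sum(1 for rn in s if rn - 1 not in s)
--     return 2 * runs
-- ===== Notes on version B (the rewrite author's own statement) =====
-- stated objective: simpler
-- what changed: Instead of tallying N-side and C-side boundaries separately for every residue of the sorted contact set, B counts the maximal contiguous runs once (a residue is a run head iff its predecessor is absent) and returns twice that count; Pre_ states the set invariant of the List-encoded argument (distinct elements), which every actual set input satisfies.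
import Mathlib
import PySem

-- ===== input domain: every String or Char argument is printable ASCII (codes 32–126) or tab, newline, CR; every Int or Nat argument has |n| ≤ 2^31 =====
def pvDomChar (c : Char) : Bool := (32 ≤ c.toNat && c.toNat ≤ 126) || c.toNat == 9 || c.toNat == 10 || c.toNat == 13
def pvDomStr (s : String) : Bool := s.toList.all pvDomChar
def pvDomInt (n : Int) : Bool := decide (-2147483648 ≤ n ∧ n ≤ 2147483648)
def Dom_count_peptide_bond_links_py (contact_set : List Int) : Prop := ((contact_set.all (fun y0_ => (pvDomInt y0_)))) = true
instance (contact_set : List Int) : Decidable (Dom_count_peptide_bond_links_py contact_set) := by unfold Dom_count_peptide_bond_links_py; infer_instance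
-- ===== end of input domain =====

-- B counts the maximal contiguous runs (run head = residue whose predecessor is absent)
-- and doubles them, instead of A's sorted per-residue N-side/C-side tally (objective: simpler).

-- ===== PORT A =====
def count_peptide_bond_links_py (contact_set : List Int) : Int :=
  let sorted_rns := PySem.List.sorted contact_set (fun x => x) false
  sorted_rns.foldl (fun n_links rn =>
    let n1 := if !(contact_set.contains (rn - 1)) then n_links + 1 else n_links
    if !(contact_set.contains (rn + 1)) then n1 + 1 else n1) 0

-- ===== PORT B =====
def count_peptide_bond_links_py_alt (contact_set : List Int) : Int :=
  let s : PySem.Set Int := PySem.Set.ofList contact_set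
  let runs : Int := s.foldl (fun acc rn =>
    if !(PySem.Set.contains s (rn - 1)) then acc + 1 else acc) 0
  2 * runs

-- ===== PRECONDITION & SPEC =====
-- contact_set is a Python set, encoded as the list of its distinct elements; Pre_
-- states that set invariant (no duplicates), which every actual set input satisfies.
def Pre_count_peptide_bond_links_py (contact_set : List Int) : Prop := contact_set.Nodup
instance (contact_set : List Int) : Decidable (Pre_count_peptide_bond_links_py contact_set) := by unfold Pre_count_peptide_bond_links_py; infer_instance
def pvWitness_count_peptide_bond_links_py : List Int := [1, 2, 5]

def Spec_count_peptide_bond_links_py (contact_set : List Int) (out : Int) : Prop := out = count_peptide_bond_links_py_alt contact_set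
instance (contact_set : List Int) (out : Int) : Decidable (Spec_count_peptide_bond_links_py contact_set out) := by unfold Spec_count_peptide_bond_links_py; infer_instance

-- ===== CLAIM (what is proved, stated in full; the proofs are below) =====
def Claim_equal_count_peptide_bond_links_py : Prop := ∀ (contact_set : List Int), Dom_count_peptide_bond_links_py contact_set → Pre_count_peptide_bond_links_py contact_set → Spec_count_peptide_bond_links_py contact_set (count_peptide_bond_links_py contact_set)

-- ===== LEMMAS AND PROOFS =====

-- boundary weight of one residue (0, 1 or 2), membership taken in the original list
def pvW (xs : List Int) (rn : Int) : Int :=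
  (if xs.contains (rn - 1) then 0 else 1) + (if xs.contains (rn + 1) then 0 else 1)

-- A's loop shape: two conditional +1s per element
lemma pvFoldl_two_ifs (f g : Int → Bool) (l : List Int) (init : Int) :
    l.foldl (fun n x =>
        let n1 := if !(f x) then n + 1 else n
        if !(g x) then n1 + 1 else n1) init
      = init + (l.map (fun x =>
          (if f x then (0:Int) else 1) + (if g x then (0:Int) else 1))).sum := by
  induction l generalizing init with
  | nil => simp
  | cons x t ih =>
    simp only [List.foldl_cons, List.map_cons, List.sum_cons, ih]
    split_ifs <;> simp_all <;> ring

-- B's loop shape: one conditional +1 per element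
lemma pvFoldl_one_if (f : Int → Bool) (l : List Int) (init : Int) :
    l.foldl (fun acc x => if !(f x) then acc + 1 else acc) init
      = init + (l.map (fun x => if f x then (0:Int) else 1)).sum := by
  induction l generalizing init with
  | nil => simp
  | cons x t ih =>
    simp only [List.foldl_cons, List.map_cons, List.sum_cons, ih]
    split_ifs <;> simp_all <;> ring

lemma pvA_eq (xs : List Int) :
    count_peptide_bond_links_py xs = (xs.map (pvW xs)).sum := by
  unfold count_peptide_bond_links_py
  rw [pvFoldl_two_ifs (fun rn => xs.contains (rn - 1)) (fun rn => xs.contains (rn + 1))]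
  have hperm : (PySem.List.sorted xs (fun x => x) false).Perm xs :=
    PySem.List.sorted_perm xs (fun x => x) false
  rw [(hperm.map _).sum_eq, zero_add]
  rfl

lemma pvContains_ofList (xs : List Int) (y : Int) :
    (PySem.Set.ofList xs).contains y = xs.contains y := by
  simp [pysem]

lemma pvB_eq (xs : List Int) :
    count_peptide_bond_links_py_alt xs
      = 2 * ((PySem.Set.ofList xs).map (fun k => if xs.contains (k - 1) then (0:Int) else 1)).sum := by
  unfold count_peptide_bond_links_py_alt
  dsimp only
  rw [pvFoldl_one_if (fun k => (PySem.Set.ofList xs).contains (k - 1)), zero_add]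
  congr 2
  apply List.map_congr_left
  intro k _
  rw [pvContains_ofList]

-- over any finite set of integers there are as many run-heads as run-tails
-- (x ↦ x+1 is a bijection between the non-tails and the non-heads), so the
-- two-sided boundary sum is twice the head count
lemma pvSum_boole_compl (S : Finset Int) (P : Int → Prop) [DecidablePred P] :
    (∑ x ∈ S, (if P x then (0:Int) else 1)) = (S.card : Int) - ((S.filter P).card : Int) := by
  have h : ∀ x ∈ S, (if P x then (0:Int) else 1) = 1 - (if P x then 1 else 0) := by
    intro x _; split_ifs <;> ring
  rw [Finset.sum_congr rfl h, Finset.sum_sub_distrib, Finset.sum_boole, Finset.sum_const]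
  simp

lemma pvKey (S : Finset Int) :
    (∑ x ∈ S, ((if x - 1 ∈ S then (0:Int) else 1) + (if x + 1 ∈ S then (0:Int) else 1)))
      = 2 * (∑ x ∈ S, (if x - 1 ∈ S then (0:Int) else 1)) := by
  have hb : (S.filter (fun x => x + 1 ∈ S)).card = (S.filter (fun x => x - 1 ∈ S)).card := by
    refine Finset.card_bij' (fun x _ => x + 1) (fun y _ => y - 1) ?_ ?_ ?_ ?_
    · intro x hx
      simp only [Finset.mem_filter] at hx ⊢
      exact ⟨hx.2, by simpa using hx.1⟩
    · intro y hy
      simp only [Finset.mem_filter] at hy ⊢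
      exact ⟨hy.2, by simpa using hy.1⟩
    · intro x _; ring
    · intro y _; ring
  rw [Finset.sum_add_distrib, pvSum_boole_compl S (fun x => x - 1 ∈ S),
      pvSum_boole_compl S (fun x => x + 1 ∈ S)]
  omega

-- ===== VERDICT (by name: the statement is the Claim_ definition above) =====
theorem count_peptide_bond_links_py_spec : Claim_equal_count_peptide_bond_links_py := by
  intro xs _ hnd
  unfold Spec_count_peptide_bond_links_py
  rw [pvA_eq, pvB_eq]
  have hfin : (PySem.Set.ofList xs).toFinset = xs.toFinset := by
    ext y; simp [PySem.Set.mem_ofList]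
  rw [← List.sum_toFinset _ hnd, ← List.sum_toFinset _ (PySem.Set.nodup_ofList xs), hfin]
  calc (∑ x ∈ xs.toFinset, pvW xs x)
      = ∑ x ∈ xs.toFinset,
          ((if x - 1 ∈ xs.toFinset then (0:Int) else 1)
            + (if x + 1 ∈ xs.toFinset then (0:Int) else 1)) := by
        apply Finset.sum_congr rfl
        intro x _
        simp [pvW]
    _ = 2 * ∑ x ∈ xs.toFinset, (if x - 1 ∈ xs.toFinset then (0:Int) else 1) :=
        pvKey xs.toFinset
    _ = 2 * ∑ x ∈ xs.toFinset, (if xs.contains (x - 1) then (0:Int) else 1) := by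
        congr 1
        apply Finset.sum_congr rfl
        intro x _
        simp
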